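-- pv_equiv track=rewrite | github.com/Patibandha/mp_test | q1/main.py | overlaps
-- ===== SOURCE A (Python) =====
-- def overlaps(first_line, second_line):
--     found = False
--     result = str(first_line) + ' & ' + str(second_line) + ' do not overlaps on x-axis'
--     index_position = 0
--     for i in range(2):
--         if first_line[i] < 0 and second_line[i] < 0:
--             while index_position < len(first_line) and not found:
--                 if second_line[index_position] >= first_line[0] or second_line[index_position] >= first_line[1]:
--                     found = True
--                     result = str(first_line) + ' & ' + str(second_line) + ' overlaps on x-axis'
--                 else:
--                     index_position += 1
--         else:
--             while index_position < len(first_line) and not found: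
--                 if second_line[index_position] <= first_line[0] or second_line[index_position] <= first_line[1]:
--                     found = True
--                     result = str(first_line) + ' & ' + str(second_line) + ' overlaps on x-axis'
--                 else:
--                     index_position += 1
--     return result
-- ===== SOURCE B (Python) =====
-- def overlaps(first_line, second_line):
--     # closed form: the scan over the two entries of second_line reduces to a min/max comparison
--     if first_line[0] < 0 and second_line[0] < 0:
--         hit = max(second_line) >= min(first_line)
--     else:
--         hit = min(second_line) <= max(first_line)
--     verdict = ' overlaps on x-axis' if hit else ' do not overlaps on x-axis'
--     return str(first_line) + ' & ' + str(second_line) + verdict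
-- ===== Notes on version B (the rewrite author's own statement) =====
-- stated objective: simpler
-- what changed: A's second outer iteration is dead and its inner scans over the two endpoints reduce to one min/max comparison, so B picks the sign branch once and compares max(second_line) with min(first_line) (resp. min with max) instead of running nested loops with found/index_position state.
import Mathlib
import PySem

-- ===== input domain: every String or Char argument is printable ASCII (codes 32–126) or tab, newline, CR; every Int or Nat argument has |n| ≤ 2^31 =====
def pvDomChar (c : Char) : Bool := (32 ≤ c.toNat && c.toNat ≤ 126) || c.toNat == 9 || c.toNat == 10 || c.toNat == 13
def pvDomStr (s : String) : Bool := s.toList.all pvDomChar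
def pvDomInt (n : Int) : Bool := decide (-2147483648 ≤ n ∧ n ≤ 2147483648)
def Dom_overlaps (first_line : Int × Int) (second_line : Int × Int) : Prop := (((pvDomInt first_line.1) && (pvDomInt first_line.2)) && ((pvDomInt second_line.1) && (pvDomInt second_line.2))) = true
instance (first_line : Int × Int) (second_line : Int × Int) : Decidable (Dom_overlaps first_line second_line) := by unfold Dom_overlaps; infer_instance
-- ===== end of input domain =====

-- B replaces A's two nested scan loops by a single min/max comparison picked once from the sign branch (objective: simpler).

-- ===== PORT A =====
-- str((a, b)) for a 2-tuple of ints
def pvStrPair (p : Int × Int) : String :=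
  "(" ++ PySem.Int.toStr p.1 ++ ", " ++ PySem.Int.toStr p.2 ++ ")"

-- p[i] for a 2-tuple, i ∈ {0, 1} (the only indices A uses)
def pvGetPair (p : Int × Int) (i : Nat) : Int := if i = 0 then p.1 else p.2

-- the inner 'while index_position < len(first_line) and not found' loop, negative branch; fuel = 2 suffices since len(first_line) = 2
def pvLoopNeg (f s : Int × Int) : Nat → Bool → String → Nat → Bool × String × Nat
  | 0, found, result, idx => (found, result, idx)
  | fuel + 1, found, result, idx =>
    if idx < 2 ∧ ¬found then
      if pvGetPair s idx ≥ f.1 ∨ pvGetPair s idx ≥ f.2 then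
        (true, pvStrPair f ++ " & " ++ pvStrPair s ++ " overlaps on x-axis", idx)
      else
        pvLoopNeg f s fuel found result (idx + 1)
    else (found, result, idx)

-- the same loop, positive branch (≤ comparisons)
def pvLoopPos (f s : Int × Int) : Nat → Bool → String → Nat → Bool × String × Nat
  | 0, found, result, idx => (found, result, idx)
  | fuel + 1, found, result, idx =>
    if idx < 2 ∧ ¬found then
      if pvGetPair s idx ≤ f.1 ∨ pvGetPair s idx ≤ f.2 then
        (true, pvStrPair f ++ " & " ++ pvStrPair s ++ " overlaps on x-axis", idx)
      else
        pvLoopPos f s fuel found result (idx + 1)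
    else (found, result, idx)

def overlaps (first_line : Int × Int) (second_line : Int × Int) : String :=
  let result0 := pvStrPair first_line ++ " & " ++ pvStrPair second_line ++ " do not overlaps on x-axis"
  let st := List.foldl
    (fun (st : Bool × String × Nat) (i : Nat) =>
      if pvGetPair first_line i < 0 ∧ pvGetPair second_line i < 0 then
        pvLoopNeg first_line second_line 2 st.1 st.2.1 st.2.2
      else
        pvLoopPos first_line second_line 2 st.1 st.2.1 st.2.2)
    (false, result0, 0) [0, 1]
  st.2.1

-- ===== PORT B =====
def overlaps_alt (first_line : Int × Int) (second_line : Int × Int) : String :=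
  let hit :=
    if first_line.1 < 0 ∧ second_line.1 < 0 then
      max second_line.1 second_line.2 ≥ min first_line.1 first_line.2
    else
      min second_line.1 second_line.2 ≤ max first_line.1 first_line.2
  let verdict := if hit then " overlaps on x-axis" else " do not overlaps on x-axis"
  pvStrPair first_line ++ " & " ++ pvStrPair second_line ++ verdict

-- ===== PRECONDITION & SPEC =====
def Spec_overlaps (first_line : Int × Int) (second_line : Int × Int) (out : String) : Prop := out = overlaps_alt first_line second_line
instance (first_line : Int × Int) (second_line : Int × Int) (out : String) : Decidable (Spec_overlaps first_line second_line out) := by unfold Spec_overlaps; infer_instance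

-- ===== CLAIM (what is proved, stated in full; the proofs are below) =====
def Claim_equal_overlaps : Prop := ∀ (first_line : Int × Int) (second_line : Int × Int), Dom_overlaps first_line second_line → Spec_overlaps first_line second_line (overlaps first_line second_line)

-- ===== LEMMAS AND PROOFS =====

theorem pvLoopNeg_done (f s : Int × Int) (fuel : Nat) (r : String) (idx : Nat) :
    pvLoopNeg f s fuel true r idx = (true, r, idx) := by
  cases fuel <;> simp [pvLoopNeg]

theorem pvLoopPos_done (f s : Int × Int) (fuel : Nat) (r : String) (idx : Nat) :
    pvLoopPos f s fuel true r idx = (true, r, idx) := by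
  cases fuel <;> simp [pvLoopPos]

theorem pvLoopNeg_two (f s : Int × Int) (fuel : Nat) (found : Bool) (r : String) :
    pvLoopNeg f s fuel found r 2 = (found, r, 2) := by
  cases fuel <;> simp [pvLoopNeg]

theorem pvLoopPos_two (f s : Int × Int) (fuel : Nat) (found : Bool) (r : String) :
    pvLoopPos f s fuel found r 2 = (found, r, 2) := by
  cases fuel <;> simp [pvLoopPos]

theorem pvLoopNeg_eval (f s : Int × Int) (r : String) :
    pvLoopNeg f s 2 false r 0 =
      if s.1 ≥ f.1 ∨ s.1 ≥ f.2 then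
        (true, pvStrPair f ++ " & " ++ pvStrPair s ++ " overlaps on x-axis", 0)
      else if s.2 ≥ f.1 ∨ s.2 ≥ f.2 then
        (true, pvStrPair f ++ " & " ++ pvStrPair s ++ " overlaps on x-axis", 1)
      else (false, r, 2) := by
  simp [pvLoopNeg, pvGetPair]

theorem pvLoopPos_eval (f s : Int × Int) (r : String) :
    pvLoopPos f s 2 false r 0 =
      if s.1 ≤ f.1 ∨ s.1 ≤ f.2 then
        (true, pvStrPair f ++ " & " ++ pvStrPair s ++ " overlaps on x-axis", 0)
      else if s.2 ≤ f.1 ∨ s.2 ≤ f.2 then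
        (true, pvStrPair f ++ " & " ++ pvStrPair s ++ " overlaps on x-axis", 1)
      else (false, r, 2) := by
  simp [pvLoopPos, pvGetPair]

-- ===== VERDICT (by name: the statement is the Claim_ definition above) =====
set_option maxHeartbeats 1000000 in
theorem overlaps_spec : Claim_equal_overlaps := by
  intro f s _
  obtain ⟨f1, f2⟩ := f
  obtain ⟨s1, s2⟩ := s
  unfold Spec_overlaps overlaps overlaps_alt
  simp only [List.foldl, pvGetPair, reduceIte]
  by_cases h1 : f1 < 0 ∧ s1 < 0
  · rw [if_pos h1, pvLoopNeg_eval]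
    split_ifs <;>
      simp [pvLoopNeg_done, pvLoopPos_done, pvLoopNeg_two, pvLoopPos_two] <;>
      first | rfl | omega
  · rw [if_neg h1, pvLoopPos_eval]
    split_ifs <;>
      simp [pvLoopNeg_done, pvLoopPos_done, pvLoopNeg_two, pvLoopPos_two] <;>
      first | rfl | omega
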